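-- pv_equiv track=rewrite | github.com/nazmulcuet11/acm | InterviewBit/heaps-and-maps/n-max-pair-combinations.py | solve
-- ===== SOURCE A (Python) =====
-- import heapq
--
-- def solve(a, b):
--     a = sorted(a)
--     b = sorted(b)
--     l = len(a) - 1
--     s = a[l] + b[l]
--     h = [(-s, (l, l))]
--     heapq.heapify(h)
--     ans = []
--     seen = {}
--     while len(ans) < len(a) and len(h) > 0:
--         sum, (x, y) = heapq.heappop(h)
--         if (x, y) in seen:
--             continue
--         seen[(x, y)] = True
--         ans.append(-sum)
--         if x > 0:
--             s = a[x - 1] + b[y]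
--             heapq.heappush(h, (-s, (x - 1, y)))
--         if y > 0:
--             s = a[x] + b[y - 1]
--             heapq.heappush(h, (-s, (x, y - 1)))
--     return ans
-- ===== SOURCE B (Python) =====
-- def solve(a, b):
--     a = sorted(a)
--     b = sorted(b)
--     n = len(a)
--     sums = sorted((a[i] + b[j] for i in range(n) for j in range(n)), reverse=True)
--     return sums[:n]
-- ===== Notes on version B (the rewrite author's own statement) =====
-- stated objective: simpler
-- what changed: The incremental heap/frontier enumeration with a seen-set is replaced by materialising all n*n pair sums of the sorted arrays and taking the first n of one descending sort.
import Mathlib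
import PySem

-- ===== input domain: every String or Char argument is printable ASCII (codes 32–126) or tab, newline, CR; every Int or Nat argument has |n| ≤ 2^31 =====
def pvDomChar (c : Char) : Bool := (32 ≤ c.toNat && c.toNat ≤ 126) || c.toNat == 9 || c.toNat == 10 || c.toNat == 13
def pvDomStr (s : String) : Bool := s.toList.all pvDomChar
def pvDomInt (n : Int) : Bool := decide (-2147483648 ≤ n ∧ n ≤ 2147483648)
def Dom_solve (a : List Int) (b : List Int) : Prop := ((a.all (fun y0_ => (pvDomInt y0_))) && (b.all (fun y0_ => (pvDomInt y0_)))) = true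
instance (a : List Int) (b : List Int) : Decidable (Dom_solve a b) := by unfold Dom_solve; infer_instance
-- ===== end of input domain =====

-- B replaces A's heap/frontier enumeration by materialising all n*n pair sums and one
-- descending sort (objective: simpler; not faster).

-- ===== PORT A =====
-- heapq on tuples (-s, (x, y)): entries are (negsum, x, y), popped in lexicographic order;
-- the heap is modelled as a lex-sorted list (pop = head, push = ordered insert), which is
-- exact for heapq's observable pop order here (entries with equal keys are identical tuples).
def solveEntryLE (e f : Int × Int × Int) : Bool :=
  decide (e.1 < f.1 ∨ (e.1 = f.1 ∧ (e.2.1 < f.2.1 ∨ (e.2.1 = f.2.1 ∧ e.2.2 ≤ f.2.2))))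

def solvePush (h : List (Int × Int × Int)) (e : Int × Int × Int) : List (Int × Int × Int) :=
  match h with
  | [] => [e]
  | x :: t => if solveEntryLE e x then e :: x :: t else x :: solvePush t e

-- the while loop of A: pop min, skip if seen, else record and push the two neighbours
def solveLoop (as_ bs : List Int) (n : Nat) (h : List (Int × Int × Int))
    (seen : PySem.Dict (Int × Int) Bool) (ans : List Int) : List Int :=
  if _hlt : ans.length < n then
    match h with
    | [] => ans
    | (s, x, y) :: h' =>
      if seen.contains (x, y) then solveLoop as_ bs n h' seen ans
      else
        let seen' := seen.insert (x, y) true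
        let h1 := if 0 < x then
            solvePush h' (-(PySem.List.pyGetD as_ (x-1) 0 + PySem.List.pyGetD bs y 0), x-1, y)
          else h'
        let h2 := if 0 < y then
            solvePush h1 (-(PySem.List.pyGetD as_ x 0 + PySem.List.pyGetD bs (y-1) 0), x, y-1)
          else h1
        solveLoop as_ bs n h2 seen' (ans ++ [-s])
  else ans
termination_by (n - ans.length, h.length)
decreasing_by
  · exact Prod.Lex.right _ (by simp)
  · have : ans.length < n := _hlt
    exact Prod.Lex.left _ _ (by simp; omega)

def solve (a : List Int) (b : List Int) : List Int :=
  let as_ := PySem.List.sorted a (fun x => x) false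
  let bs := PySem.List.sorted b (fun x => x) false
  let l : Int := (as_.length : Int) - 1
  match PySem.List.pyGet? as_ l, PySem.List.pyGet? bs l with
  | some av, some bv => solveLoop as_ bs as_.length [(-(av + bv), l, l)] PySem.Dict.empty []
  | _, _ => []  -- a[l] or b[l] raises IndexError in Python; excluded by Pre_solve

-- ===== PORT B =====
def solve_alt (a : List Int) (b : List Int) : List Int :=
  let as_ := PySem.List.sorted a (fun x => x) false
  let bs := PySem.List.sorted b (fun x => x) false
  let n := as_.length
  let sums := PySem.List.sorted
    ((PySem.List.pyRange 0 (n : Int) 1).flatMap (fun i =>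
      (PySem.List.pyRange 0 (n : Int) 1).map (fun j =>
        PySem.List.pyGetD as_ i 0 + PySem.List.pyGetD bs j 0)))
    (fun x => x) true
  PySem.List.slice sums none (some (n : Int))

-- ===== PRECONDITION & SPEC =====
-- A raises IndexError when a is empty (a[-1]) or when len(b) < len(a) (b[len(a)-1]);
-- Pre_solve is exactly the set of inputs on which the Python A returns.
def Pre_solve (a : List Int) (b : List Int) : Prop := a ≠ [] ∧ a.length ≤ b.length
instance (a : List Int) (b : List Int) : Decidable (Pre_solve a b) := by
  unfold Pre_solve; infer_instance
def pvWitness_solve : List Int × List Int := ([1], [2])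

def Spec_solve (a : List Int) (b : List Int) (out : List Int) : Prop := out = solve_alt a b
instance (a : List Int) (b : List Int) (out : List Int) : Decidable (Spec_solve a b out) := by
  unfold Spec_solve; infer_instance

-- ===== CLAIM (what is proved, stated in full; the proofs are below) =====
def Claim_equal_solve : Prop := ∀ (a : List Int) (b : List Int), Dom_solve a b → Pre_solve a b → Spec_solve a b (solve a b)

-- ===== LEMMAS AND PROOFS =====

-- proof-only abbreviations
def eCell (e : Int × Int × Int) : Int × Int := (e.2.1, e.2.2)
def pvVal (as_ bs : List Int) (c : Int × Int) : Int :=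
  PySem.List.pyGetD as_ c.1 0 + PySem.List.pyGetD bs c.2 0
def pvCells (n : Nat) : List (Int × Int) :=
  ((List.range n) ×ˢ (List.range n)).map (fun p => ((p.1 : Int), (p.2 : Int)))
def pvUnseen (n : Nat) (seen : PySem.Dict (Int × Int) Bool) : List (Int × Int) :=
  (pvCells n).filter (fun c => !seen.contains c)
def sortDesc (xs : List Int) : List Int := PySem.List.sorted xs (fun x => x) true

structure pvInv (as_ bs : List Int) (n : Nat) (h : List (Int × Int × Int))
    (seen : PySem.Dict (Int × Int) Bool) (ans : List Int) : Prop where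
  hsort : h.Pairwise (fun e f => solveEntryLE e f = true)
  hcell : ∀ e ∈ h, eCell e ∈ pvCells n ∧ e.1 = -(pvVal as_ bs (eCell e))
  hcount : ans.length + (pvUnseen n seen).length = n * n
  hfront : ∀ c ∈ pvCells n, seen.contains c = false →
    (∃ e ∈ h, eCell e = c) ∨
    (∃ u ∈ pvCells n, seen.contains u = false ∧ (u = (c.1 + 1, c.2) ∨ u = (c.1, c.2 + 1)))

theorem entryLE_trans (e f g : Int × Int × Int) (h1 : solveEntryLE e f = true)
    (h2 : solveEntryLE f g = true) : solveEntryLE e g = true := by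
  simp [solveEntryLE] at *; omega

theorem mem_pvCells (n : Nat) (c : Int × Int) :
    c ∈ pvCells n ↔ 0 ≤ c.1 ∧ c.1 < (n : Int) ∧ 0 ≤ c.2 ∧ c.2 < (n : Int) := by
  unfold pvCells
  constructor
  · intro hc
    obtain ⟨⟨i, j⟩, hp, rfl⟩ := List.mem_map.mp hc
    obtain ⟨h1, h2⟩ := List.mem_product.mp hp
    simp only [List.mem_range] at h1 h2
    refine ⟨?_, ?_, ?_, ?_⟩ <;> simp <;> omega
  · rintro ⟨h1, h2, h3, h4⟩
    apply List.mem_map.mpr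
    refine ⟨(c.1.toNat, c.2.toNat), List.mem_product.mpr ⟨?_, ?_⟩, ?_⟩
    · simp only [List.mem_range]; omega
    · simp only [List.mem_range]; omega
    · cases c with
      | mk c1 c2 => simp [Int.toNat_of_nonneg h1, Int.toNat_of_nonneg h3]

theorem nodup_pvCells (n : Nat) : (pvCells n).Nodup := by
  unfold pvCells
  apply List.Nodup.map
  · rintro ⟨i, j⟩ ⟨k, l⟩ hp
    simp only [Prod.mk.injEq, Int.natCast_inj] at hp
    simp [hp.1, hp.2]
  · exact List.Nodup.product (List.nodup_range) (List.nodup_range)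

theorem length_pvCells (n : Nat) : (pvCells n).length = n * n := by
  simp [pvCells, List.length_product]

theorem entryLE_total (e f : Int × Int × Int) :
    solveEntryLE e f = true ∨ solveEntryLE f e = true := by
  simp [solveEntryLE]; omega

theorem mem_solvePush (h : List (Int × Int × Int)) (e f : Int × Int × Int) :
    f ∈ solvePush h e ↔ f = e ∨ f ∈ h := by
  induction h with
  | nil => simp [solvePush]
  | cons x t ih =>
    by_cases hc : solveEntryLE e x = true
    · simp [solvePush, hc]
    · simp [solvePush, hc, ih]; tauto

theorem pairwise_solvePush (h : List (Int × Int × Int)) (e : Int × Int × Int)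
    (hp : h.Pairwise (fun a b => solveEntryLE a b = true)) :
    (solvePush h e).Pairwise (fun a b => solveEntryLE a b = true) := by
  induction h with
  | nil => simp [solvePush]
  | cons x t ih =>
    obtain ⟨hx, ht⟩ := List.pairwise_cons.mp hp
    by_cases hc : solveEntryLE e x = true
    · have hrw : solvePush (x :: t) e = e :: x :: t := by simp [solvePush, hc]
      rw [hrw]
      refine List.pairwise_cons.mpr ⟨?_, hp⟩
      intro f hf
      rcases List.mem_cons.mp hf with rfl | hf
      · exact hc
      · exact entryLE_trans e x f hc (hx f hf)
    · have hrw : solvePush (x :: t) e = x :: solvePush t e := by simp [solvePush, hc]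
      rw [hrw]
      refine List.pairwise_cons.mpr ⟨?_, ih ht⟩
      intro f hf
      rcases (mem_solvePush t e f).mp hf with rfl | hf
      · rcases entryLE_total f x with h | h
        · exact absurd h hc
        · exact h
      · exact hx f hf

theorem filter_insert_erase (xs : List (Int × Int)) (hx : xs.Nodup)
    (seen : PySem.Dict (Int × Int) Bool) (d : Int × Int) (hd : seen.contains d = false) :
    xs.filter (fun c => !(seen.insert d true).contains c)
      = (xs.filter (fun c => !seen.contains c)).erase d := by
  induction xs with
  | nil => simp
  | cons x t ih =>
    obtain ⟨hxt, hnd⟩ := List.nodup_cons.mp hx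
    by_cases hxd : x = d
    · subst hxd
      have h1 : (seen.insert x true).contains x = true := by
        simp [PySem.Dict.contains_insert]
      rw [List.filter_cons, List.filter_cons]
      simp only [h1, Bool.not_true, hd, Bool.not_false, if_true,
        List.erase_cons_head]
      apply List.filter_congr
      intro c hc
      have hne : c ≠ x := fun h => hxt (h ▸ hc)
      simp [PySem.Dict.contains_insert, hne]
    · rw [List.filter_cons, List.filter_cons]
      have h2 : (seen.insert d true).contains x = seen.contains x := by
        simp [PySem.Dict.contains_insert, hxd]
      rw [h2]
      by_cases hox : seen.contains x = true
      · simp only [hox, Bool.not_true]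
        exact ih hnd
      · simp only [Bool.not_eq_true] at hox
        simp only [hox, Bool.not_false, if_true]
        rw [List.erase_cons_tail (by simp [hxd])]
        rw [ih hnd]

theorem pyGetD_mono (xs : List Int) (hs : xs.Pairwise (· ≤ ·)) (i : Int)
    (h0 : 0 ≤ i) (hi : i + 1 < (xs.length : Int)) :
    PySem.List.pyGetD xs i 0 ≤ PySem.List.pyGetD xs (i + 1) 0 := by
  rw [PySem.List.pyGetD_eq_getElem xs 0 h0 (by omega),
    PySem.List.pyGetD_eq_getElem xs 0 (by omega) hi]
  exact List.pairwise_iff_getElem.mp hs _ _ (by omega) (by omega) (by omega)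

theorem sortDesc_pairwise_neg (xs : List Int) :
    (sortDesc xs).Pairwise (fun a b => -a ≤ -b) := by
  have h := PySem.List.sorted_pairwise_rev xs (fun x => x)
  refine h.imp ?_
  intro a b hab
  have hab' : b ≤ a := hab
  show -a ≤ -b
  omega

theorem sortDesc_perm_congr (xs ys : List Int) (hp : xs.Perm ys) :
    sortDesc xs = sortDesc ys := by
  apply PySem.List.eq_of_perm_of_pairwise_le_of_injective (fun v : Int => -v)
    neg_injective
  · exact ((PySem.List.sorted_perm xs (fun x => x) true).trans hp).trans
      (PySem.List.sorted_perm ys (fun x => x) true).symm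
  · exact sortDesc_pairwise_neg xs
  · exact sortDesc_pairwise_neg ys

theorem sortDesc_eq_cons (xs : List Int) (x : Int) (hx : x ∈ xs)
    (hmax : ∀ y ∈ xs, y ≤ x) : sortDesc xs = x :: sortDesc (xs.erase x) := by
  apply PySem.List.eq_of_perm_of_pairwise_le_of_injective (fun v : Int => -v)
    neg_injective
  · exact ((PySem.List.sorted_perm xs (fun x => x) true).trans
      (List.perm_cons_erase hx)).trans
      ((PySem.List.sorted_perm (xs.erase x) (fun x => x) true).symm.cons x)
  · exact sortDesc_pairwise_neg xs
  · refine List.pairwise_cons.mpr ⟨?_, sortDesc_pairwise_neg (xs.erase x)⟩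
    intro y hy
    have h1 : y ∈ xs.erase x :=
      (PySem.List.sorted_perm (xs.erase x) (fun x => x) true).mem_iff.mp hy
    have h2 : y ≤ x := hmax y (List.mem_of_mem_erase h1)
    show -x ≤ -y
    omega

theorem pvChain (as_ bs : List Int) (n : Nat) (h : List (Int × Int × Int))
    (seen : PySem.Dict (Int × Int) Bool)
    (hsa : as_.Pairwise (· ≤ ·)) (hsb : bs.Pairwise (· ≤ ·))
    (hna : n = as_.length) (hnb : n ≤ bs.length)
    (hfront : ∀ c ∈ pvCells n, seen.contains c = false →
      (∃ e ∈ h, eCell e = c) ∨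
      (∃ u ∈ pvCells n, seen.contains u = false ∧ (u = (c.1 + 1, c.2) ∨ u = (c.1, c.2 + 1)))) :
    ∀ (k : Nat) (c : Int × Int), c ∈ pvCells n → seen.contains c = false →
      (2 * (n : Int) - 2 - c.1 - c.2).toNat ≤ k →
      ∃ e ∈ h, pvVal as_ bs c ≤ pvVal as_ bs (eCell e) := by
  intro k
  induction k with
  | zero =>
    intro c hc hu hm
    obtain ⟨h1, h2, h3, h4⟩ := (mem_pvCells n c).mp hc
    rcases hfront c hc hu with ⟨e, he, hec⟩ | ⟨u, hu2, _, hor⟩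
    · exact ⟨e, he, by simp [hec]⟩
    · exfalso
      obtain ⟨g1, g2, g3, g4⟩ := (mem_pvCells n u).mp hu2
      rcases hor with rfl | rfl <;> simp at g2 g4 <;> omega
  | succ k ih =>
    intro c hc hu hm
    obtain ⟨h1, h2, h3, h4⟩ := (mem_pvCells n c).mp hc
    rcases hfront c hc hu with ⟨e, he, hec⟩ | ⟨u, hu2, hu3, hor⟩
    · exact ⟨e, he, by simp [hec]⟩
    · obtain ⟨g1, g2, g3, g4⟩ := (mem_pvCells n u).mp hu2
      have hvc : pvVal as_ bs c ≤ pvVal as_ bs u := by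
        rcases hor with rfl | rfl
        · simp only [pvVal]
          have hmono := pyGetD_mono as_ hsa c.1 h1
            (by simp at g2
                have hcast : (n : Int) = (as_.length : Int) := by exact_mod_cast hna
                omega)
          simp at hmono ⊢
          omega
        · simp only [pvVal]
          have hmono := pyGetD_mono bs hsb c.2 h3
            (by simp at g4
                have hcast : (n : Int) ≤ (bs.length : Int) := by exact_mod_cast hnb
                omega)
          simp at hmono ⊢
          omega
      have hmu : (2 * (n : Int) - 2 - u.1 - u.2).toNat ≤ k := by
        rcases hor with rfl | rfl <;> simp <;> omega
      obtain ⟨e, he, hve⟩ := ih u hu2 hu3 hmu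
      exact ⟨e, he, le_trans hvc hve⟩

theorem solveLoop_eq (as_ bs : List Int) (n : Nat)
    (hsa : as_.Pairwise (· ≤ ·)) (hsb : bs.Pairwise (· ≤ ·))
    (hna : n = as_.length) (hnb : n ≤ bs.length) (hn1 : 1 ≤ n) :
    ∀ (m : Nat) (h : List (Int × Int × Int)) (seen : PySem.Dict (Int × Int) Bool)
      (ans : List Int), n - ans.length ≤ m → pvInv as_ bs n h seen ans →
      solveLoop as_ bs n h seen ans
        = ans ++ (sortDesc ((pvUnseen n seen).map (pvVal as_ bs))).take (n - ans.length) := by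
  intro m
  induction m with
  | zero =>
    intro h seen ans hm _inv
    have hge : ¬ ans.length < n := by omega
    rw [solveLoop.eq_def]
    simp only [hge, dite_false]
    have h0 : n - ans.length = 0 := by omega
    rw [h0]
    simp
  | succ m ihm =>
    intro h
    induction h with
    | nil =>
      intro seen ans hm inv
      by_cases hlt : ans.length < n
      · exfalso
        have hcnt := inv.hcount
        have hnn : n ≤ n * n := Nat.le_mul_of_pos_left n (by omega)
        have hne : pvUnseen n seen ≠ [] := by
          intro hE
          rw [hE] at hcnt
          simp at hcnt
          omega
        obtain ⟨c, hcU⟩ := List.exists_mem_of_ne_nil _ hne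
        have hcc := List.mem_filter.mp hcU
        obtain ⟨e, he, _⟩ := pvChain as_ bs n [] seen hsa hsb hna hnb inv.hfront
          ((2 * (n : Int) - 2 - c.1 - c.2).toNat) c hcc.1 (by simpa using hcc.2) le_rfl
        simp at he
      · rw [solveLoop.eq_def]
        simp only [hlt, dite_false]
        have h0 : n - ans.length = 0 := by omega
        rw [h0]
        simp
    | cons e0 h' ihh =>
      obtain ⟨s, x, y⟩ := e0
      intro seen ans hm inv
      by_cases hlt : ans.length < n
      swap
      · rw [solveLoop.eq_def]
        simp only [hlt, dite_false]
        have h0 : n - ans.length = 0 := by omega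
        rw [h0]
        simp
      by_cases hseen : seen.contains (x, y) = true
      · -- skip: (x, y) already seen
        rw [solveLoop.eq_def]
        simp only [hlt, dite_true, hseen, if_true]
        refine ihh seen ans hm ?_
        obtain ⟨hx0, ht'⟩ := List.pairwise_cons.mp inv.hsort
        refine ⟨ht', fun e he => inv.hcell e (List.mem_cons_of_mem _ he), inv.hcount, ?_⟩
        intro c hc hcu
        rcases inv.hfront c hc hcu with ⟨e, he, hec⟩ | hcov
        · rcases List.mem_cons.mp he with rfl | he'
          · exfalso
            simp only [eCell] at hec
            rw [hec] at hseen
            rw [hseen] at hcu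
            exact absurd hcu (by simp)
          · exact Or.inl ⟨e, he', hec⟩
        · exact Or.inr hcov
      · -- normal pop
        have hseen' : seen.contains (x, y) = false := by
          simpa using hseen
        obtain ⟨hdC, hsv0⟩ := inv.hcell (s, x, y) List.mem_cons_self
        simp only [eCell] at hdC hsv0
        obtain ⟨hx0, hxn, hy0, hyn⟩ := (mem_pvCells n (x, y)).mp hdC
        obtain ⟨hhd, ht'⟩ := List.pairwise_cons.mp inv.hsort
        have hdU : (x, y) ∈ pvUnseen n seen :=
          List.mem_filter.mpr ⟨hdC, by simp [hseen']⟩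
        -- the popped value is the maximum of the unseen values
        have hmax : ∀ w ∈ (pvUnseen n seen).map (pvVal as_ bs), w ≤ pvVal as_ bs (x, y) := by
          intro w hw
          obtain ⟨c, hcU, rfl⟩ := List.mem_map.mp hw
          have hcc := List.mem_filter.mp hcU
          obtain ⟨e, he, hvce⟩ := pvChain as_ bs n ((s, x, y) :: h') seen hsa hsb hna hnb
            inv.hfront ((2 * (n : Int) - 2 - c.1 - c.2).toNat) c hcc.1
            (by simpa using hcc.2) le_rfl
          refine le_trans hvce ?_
          rcases List.mem_cons.mp he with rfl | he'
          · simp [eCell]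
          · have hle := hhd e he'
            have hcell_e := (inv.hcell e (List.mem_cons_of_mem _ he')).2
            simp only [solveEntryLE, decide_eq_true_eq] at hle
            have hs_le : s ≤ e.1 := by omega
            rw [hcell_e] at hs_le
            rw [hsv0] at hs_le
            omega
        -- children of the popped cell
        set c1e : Int × Int × Int :=
          (-(PySem.List.pyGetD as_ (x - 1) 0 + PySem.List.pyGetD bs y 0), x - 1, y) with hc1e
        set c2e : Int × Int × Int :=
          (-(PySem.List.pyGetD as_ x 0 + PySem.List.pyGetD bs (y - 1) 0), x, y - 1) with hc2e
        set h1 : List (Int × Int × Int) := if 0 < x then solvePush h' c1e else h' with hh1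
        set h2 : List (Int × Int × Int) := if 0 < y then solvePush h1 c2e else h1 with hh2
        have hmem1 : ∀ f, f ∈ h1 ↔ (0 < x ∧ f = c1e) ∨ f ∈ h' := by
          intro f
          by_cases h0x : 0 < x <;> simp [hh1, h0x, mem_solvePush]
        have hmem2 : ∀ f, f ∈ h2 ↔ (0 < y ∧ f = c2e) ∨ f ∈ h1 := by
          intro f
          by_cases h0y : 0 < y <;> simp [hh2, h0y, mem_solvePush]
        have hpw1 : h1.Pairwise (fun a b => solveEntryLE a b = true) := by
          by_cases h0x : 0 < x
          · rw [hh1, if_pos h0x]; exact pairwise_solvePush h' c1e ht'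
          · rw [hh1, if_neg h0x]; exact ht'
        have hpw2 : h2.Pairwise (fun a b => solveEntryLE a b = true) := by
          by_cases h0y : 0 < y
          · rw [hh2, if_pos h0y]; exact pairwise_solvePush h1 c2e hpw1
          · rw [hh2, if_neg h0y]; exact hpw1
        -- the new unseen set
        have hU' : pvUnseen n (seen.insert (x, y) true) = (pvUnseen n seen).erase (x, y) := by
          unfold pvUnseen
          exact filter_insert_erase (pvCells n) (nodup_pvCells n) seen (x, y) hseen'
        have hperm : (((pvUnseen n seen).erase (x, y)).map (pvVal as_ bs)).Perm
            (((pvUnseen n seen).map (pvVal as_ bs)).erase (pvVal as_ bs (x, y))) := by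
          have p1 := (List.perm_cons_erase hdU).map (pvVal as_ bs)
          have p2 := List.perm_cons_erase (List.mem_map_of_mem hdU (f := pvVal as_ bs))
          exact (List.Perm.cons_inv (p1.symm.trans p2))
        -- new invariant
        have inv2 : pvInv as_ bs n h2 (seen.insert (x, y) true) (ans ++ [-s]) := by
          refine ⟨hpw2, ?_, ?_, ?_⟩
          · intro e he
            rcases (hmem2 e).mp he with ⟨h0y, rfl⟩ | he1
            · constructor
              · exact (mem_pvCells n (x, y - 1)).mpr ⟨by omega, by omega, by omega, by omega⟩
              · rfl
            · rcases (hmem1 e).mp he1 with ⟨h0x, rfl⟩ | he'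
              · constructor
                · exact (mem_pvCells n (x - 1, y)).mpr ⟨by omega, by omega, by omega, by omega⟩
                · rfl
              · exact inv.hcell e (List.mem_cons_of_mem _ he')
          · rw [hU']
            have hlen := List.length_erase_of_mem hdU
            have hpos : 0 < (pvUnseen n seen).length := List.length_pos_of_mem hdU
            have hcnt := inv.hcount
            simp only [List.length_append, List.length_cons, List.length_nil, hlen]
            omega
          · intro c hc hcu
            have hcu2 : c ≠ (x, y) ∧ seen.contains c = false := by
              rw [PySem.Dict.contains_insert] at hcu
              constructor
              · intro hE; rw [hE] at hcu; simp at hcu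
              · rcases Bool.or_eq_false_iff.mp hcu with ⟨_, h⟩; exact h
            rcases inv.hfront c hc hcu2.2 with ⟨e, he, hec⟩ | ⟨u, huc, huu, hor⟩
            · rcases List.mem_cons.mp he with rfl | he'
              · exfalso
                simp only [eCell] at hec
                exact hcu2.1 hec.symm
              · exact Or.inl ⟨e, (hmem2 e).mpr (Or.inr ((hmem1 e).mpr (Or.inr he'))), hec⟩
            · by_cases hud : u = (x, y)
              · -- the covering cell is the one just seen: its child entry was pushed
                subst hud
                obtain ⟨hcx0, hcxn, hcy0, hcyn⟩ := (mem_pvCells n c).mp hc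
                rcases hor with hcase | hcase
                · have hx' : x = c.1 + 1 ∧ y = c.2 := by
                    constructor
                    · exact congrArg Prod.fst hcase
                    · exact congrArg Prod.snd hcase
                  refine Or.inl ⟨c1e, (hmem2 c1e).mpr (Or.inr ((hmem1 c1e).mpr
                    (Or.inl ⟨by omega, rfl⟩))), ?_⟩
                  simp only [eCell, hc1e]
                  obtain ⟨hh1', hh2'⟩ := hx'
                  cases c with
                  | mk ca cb => simp at hh1' hh2' ⊢; omega
                · have hy' : x = c.1 ∧ y = c.2 + 1 := by
                    constructor
                    · exact congrArg Prod.fst hcase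
                    · exact congrArg Prod.snd hcase
                  refine Or.inl ⟨c2e, (hmem2 c2e).mpr (Or.inl ⟨by omega, rfl⟩), ?_⟩
                  simp only [eCell, hc2e]
                  obtain ⟨hh1', hh2'⟩ := hy'
                  cases c with
                  | mk ca cb => simp at hh1' hh2' ⊢; omega
              · refine Or.inr ⟨u, huc, ?_, hor⟩
                rw [PySem.Dict.contains_insert]
                simp [hud, huu]
        -- unfold one loop step and use the outer induction hypothesis
        rw [solveLoop.eq_def]
        simp only [hlt, dite_true, hseen]
        rw [show (if 0 < x then
            solvePush h' (-(PySem.List.pyGetD as_ (x-1) 0 + PySem.List.pyGetD bs y 0), x-1, y)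
          else h') = h1 from rfl]
        rw [show (if 0 < y then
            solvePush h1 (-(PySem.List.pyGetD as_ x 0 + PySem.List.pyGetD bs (y-1) 0), x, y-1)
          else h1) = h2 from rfl]
        rw [ihm h2 (seen.insert (x, y) true) (ans ++ [-s]) (by simp; omega) inv2]
        rw [hU', sortDesc_perm_congr _ _ hperm]
        rw [sortDesc_eq_cons ((pvUnseen n seen).map (pvVal as_ bs)) (pvVal as_ bs (x, y))
          (List.mem_map_of_mem hdU) hmax]
        have hsv : -s = pvVal as_ bs (x, y) := by omega
        have htake : n - ans.length = (n - (ans.length + 1)) + 1 := by omega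
        rw [htake, List.take_succ_cons]
        simp only [List.length_append, List.length_cons, List.length_nil, List.append_assoc,
          List.cons_append, List.nil_append, hsv]
        simp

-- ===== VERDICT (by name: the statement is the Claim_ definition above) =====
set_option maxHeartbeats 1000000 in
theorem solve_spec : Claim_equal_solve := by
  unfold Claim_equal_solve
  intro a b _dom hpre
  unfold Spec_solve
  obtain ⟨hane, hab⟩ := hpre
  simp only [solve, solve_alt]
  set as_ := PySem.List.sorted a (fun x => x) false with has
  set bs := PySem.List.sorted b (fun x => x) false with hbs
  have hlena : as_.length = a.length := by rw [has]; exact PySem.List.length_sorted a _ _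
  have hlenb : bs.length = b.length := by rw [hbs]; exact PySem.List.length_sorted b _ _
  set n := as_.length with hn
  have hn1 : 1 ≤ n := by
    rw [hlena]
    exact List.length_pos_of_ne_nil hane
  have hnb : n ≤ bs.length := by rw [hlena, hlenb]; exact hab
  have hsa : as_.Pairwise (· ≤ ·) := PySem.List.sorted_pairwise a (fun x => x)
  have hsb : bs.Pairwise (· ≤ ·) := PySem.List.sorted_pairwise b (fun x => x)
  set l : Int := (n : Int) - 1 with hl
  clear_value l n as_ bs
  have e1 : PySem.List.pyGet? as_ l = some as_[l.toNat] :=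
    PySem.List.pyGet?_eq_some_getElem as_ (by omega) (by omega)
  have e2 : PySem.List.pyGet? bs l = some bs[l.toNat] :=
    PySem.List.pyGet?_eq_some_getElem bs (by omega) (by omega)
  rw [e1, e2]
  have hga : PySem.List.pyGetD as_ l 0 = as_[l.toNat] :=
    PySem.List.pyGetD_eq_getElem as_ 0 (by omega) (by omega)
  have hgb : PySem.List.pyGetD bs l 0 = bs[l.toNat] :=
    PySem.List.pyGetD_eq_getElem bs 0 (by omega) (by omega)
  -- initial invariant
  have inv0 : pvInv as_ bs n [(-(as_[l.toNat] + bs[l.toNat]), l, l)] PySem.Dict.empty [] := by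
    refine ⟨?_, ?_, ?_, ?_⟩
    · simp
    · intro e he
      simp only [List.mem_singleton] at he
      subst he
      constructor
      · exact (mem_pvCells n (l, l)).mpr ⟨by omega, by omega, by omega, by omega⟩
      · simp only [eCell, pvVal, hga, hgb]
    · simp [pvUnseen, PySem.Dict.contains_empty, length_pvCells]
    · intro c hc _
      obtain ⟨b1, b2, b3, b4⟩ := (mem_pvCells n c).mp hc
      by_cases hcl : c = (l, l)
      · exact Or.inl ⟨_, List.mem_singleton_self _, by simp [eCell, hcl]⟩
      · right
        by_cases hcx : c.1 < l
        · exact ⟨(c.1 + 1, c.2),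
            (mem_pvCells n _).mpr ⟨by dsimp only; omega, by dsimp only; omega,
              by dsimp only; omega, by dsimp only; omega⟩,
            PySem.Dict.contains_empty _, Or.inl rfl⟩
        · have hcy : c.2 < l := by
            cases c with
            | mk ca cb =>
              simp only [Prod.mk.injEq, not_and] at hcl
              simp only at hcx b1 b2 b3 b4 ⊢
              by_cases hca : ca = l
              · have := hcl hca; omega
              · omega
          exact ⟨(c.1, c.2 + 1),
            (mem_pvCells n _).mpr ⟨by dsimp only; omega, by dsimp only; omega,
              by dsimp only; omega, by dsimp only; omega⟩,
            PySem.Dict.contains_empty _, Or.inr rfl⟩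
  show solveLoop as_ bs n [(-(as_[l.toNat] + bs[l.toNat]), l, l)] PySem.Dict.empty [] = _
  rw [solveLoop_eq as_ bs n hsa hsb hn hnb hn1 n _ PySem.Dict.empty [] (by simp) inv0]
  -- both sides are take n of the descending sort of all n*n pair sums
  have hunseen : pvUnseen n PySem.Dict.empty = pvCells n := by
    simp [pvUnseen, PySem.Dict.contains_empty]
  have hmap : (pvCells n).map (pvVal as_ bs)
      = (PySem.List.pyRange 0 (n : Int) 1).flatMap (fun i =>
          (PySem.List.pyRange 0 (n : Int) 1).map (fun j =>
            PySem.List.pyGetD as_ i 0 + PySem.List.pyGetD bs j 0)) := by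
    rw [show PySem.List.pyRange 0 (n : Int) 1 = PySem.List.pyRange 0 (n : Int) from rfl]
    rw [PySem.List.pyRange_zero_natCast]
    simp only [pvCells, SProd.sprod, List.product, List.map_flatMap, List.flatMap_map,
      List.map_map]
    apply congrArg (fun f => List.flatMap f (List.range n))
    funext i
    apply congrArg (fun g => List.map g (List.range n))
    funext j
    simp [pvVal, Function.comp]
  rw [hunseen, hmap]
  rw [show PySem.List.slice (PySem.List.sorted ((PySem.List.pyRange 0 (n : Int) 1).flatMap
      (fun i => (PySem.List.pyRange 0 (n : Int) 1).map (fun j =>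
        PySem.List.pyGetD as_ i 0 + PySem.List.pyGetD bs j 0))) (fun x => x) true)
      none (some (n : Int))
    = ((PySem.List.sorted ((PySem.List.pyRange 0 (n : Int) 1).flatMap
      (fun i => (PySem.List.pyRange 0 (n : Int) 1).map (fun j =>
        PySem.List.pyGetD as_ i 0 + PySem.List.pyGetD bs j 0))) (fun x => x) true)).take n
    from PySem.List.slice_to_natCast _ n]
  simp [sortDesc]
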